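-- pv_equiv track=rewrite | github.com/leshless/my | olympics/spbgu/g.py | neigbours
-- ===== SOURCE A (Python) =====
-- def neigbours(u):
--     if isinstance(u, int):
--         u = [u]
--     else:
--         u = list(u)
--     n = len(u)
--
--     nbs = []
--
--     for i in range(len(u)):
--         a = u[i]
--         a -= k
--         for b in range(0, a // 2 + 1):
--             res = u[:i] + u[i+1:]
--
--             if b >= k:
--                 res.append(b)
--             if a-b >= k:
--                 res.append(a-b)
--
--             nbs.append(tuple(sorted(res)))
--
--     return nbs
--
-- k = 3
-- ===== SOURCE B (Python) =====
-- k = 3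
--
-- def _insert_sorted(xs, x):
--     # new sorted list with x inserted after any equal elements
--     i = 0
--     while i < len(xs) and xs[i] <= x:
--         i += 1
--     return xs[:i] + [x] + xs[i:]
--
-- def _maybe2(rest, b, c):
--     r = _insert_sorted(rest, b) if b >= k else rest
--     return _insert_sorted(r, c) if c >= k else r
--
-- def _tuples_for(rest, a):
--     return [tuple(_maybe2(rest, b, a - b)) for b in range(0, a // 2 + 1)]
--
-- def neigbours(u):
--     if isinstance(u, int):
--         u = [u]
--     else:
--         u = list(u)
--     out = []
--     for i in range(len(u)):
--         rest = sorted(u[:i] + u[i + 1:])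
--         a = u[i] - k
--         out.extend(_tuples_for(rest, a))
--     return out
-- ===== Notes on version B (the rewrite author's own statement) =====
-- stated objective: alternative
-- what changed: Instead of re-sorting each candidate tuple from scratch, B sorts the base list u[:i]+u[i+1:] once per index and builds each tuple by sorted-insertion of b and a-b into that presorted list; it trades A's per-tuple library sort for a per-index sort plus linear inserts.
import Mathlib
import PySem

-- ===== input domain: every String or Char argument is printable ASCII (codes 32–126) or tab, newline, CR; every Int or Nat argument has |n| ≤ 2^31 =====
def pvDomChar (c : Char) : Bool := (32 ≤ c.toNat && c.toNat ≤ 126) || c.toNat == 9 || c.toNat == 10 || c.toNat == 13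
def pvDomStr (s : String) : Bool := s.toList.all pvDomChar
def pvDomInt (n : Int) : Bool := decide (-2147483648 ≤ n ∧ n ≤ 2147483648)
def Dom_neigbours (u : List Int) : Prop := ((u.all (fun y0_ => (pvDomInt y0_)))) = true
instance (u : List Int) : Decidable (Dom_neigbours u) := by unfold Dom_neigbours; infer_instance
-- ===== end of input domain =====

-- B (alternative): sorts the base list once per index and builds each tuple by sorted-insertion of b and a-b, instead of sorting every tuple.

-- ===== PORT A =====
-- for i in range(len(u)): a = u[i]-3; for b in range(0, a//2+1): res = u[:i]+u[i+1:] (+[b] if b>=3) (+[a-b] if a-b>=3); append sorted(res)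
def neigbours (u : List Int) : List (List Int) :=
  (List.range u.length).foldl (fun nbs i =>
    let a := u.getD i 0 - 3      -- u[i], i < len u so exact
    (PySem.List.pyRange 0 (PySem.Int.floordiv a 2 + 1) 1).foldl (fun nbs2 b =>
      let res := u.take i ++ u.drop (i + 1)
      let res := if 3 ≤ b then res ++ [b] else res
      let res := if 3 ≤ a - b then res ++ [a - b] else res
      nbs2 ++ [PySem.List.sorted res (fun x => x) false]) nbs) []

-- ===== PORT B =====
-- _insert_sorted: walk past elements ≤ x, then place x (linear insertion into a sorted list)
def insortInt (x : Int) : List Int → List Int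
  | [] => [x]
  | y :: ys => if y ≤ x then y :: insortInt x ys else x :: y :: ys

def neigbours_alt (u : List Int) : List (List Int) :=
  (List.range u.length).foldl (fun out i =>
    let rest := PySem.List.sorted (u.take i ++ u.drop (i + 1)) (fun x => x) false
    let a := u.getD i 0 - 3
    out ++ (PySem.List.pyRange 0 (PySem.Int.floordiv a 2 + 1) 1).map (fun b =>
      let r := if 3 ≤ b then insortInt b rest else rest
      if 3 ≤ a - b then insortInt (a - b) r else r)) []

-- ===== PRECONDITION & SPEC =====
def Spec_neigbours (u : List Int) (out : List (List Int)) : Prop := out = neigbours_alt u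
instance (u : List Int) (out : List (List Int)) : Decidable (Spec_neigbours u out) := by unfold Spec_neigbours; infer_instance

-- ===== CLAIM (what is proved, stated in full; the proofs are below) =====
def Claim_equal_neigbours : Prop := ∀ (u : List Int), Dom_neigbours u → Spec_neigbours u (neigbours u)

-- ===== LEMMAS AND PROOFS =====

theorem mem_insortInt (x z : Int) (ys : List Int) :
    z ∈ insortInt x ys ↔ z = x ∨ z ∈ ys := by
  induction ys with
  | nil => simp [insortInt]
  | cons y ys ih =>
    simp only [insortInt]
    split_ifs
    · simp [ih]; tauto
    · simp

theorem insortInt_perm (x : Int) (ys : List Int) :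
    (insortInt x ys).Perm (x :: ys) := by
  induction ys with
  | nil => simp [insortInt]
  | cons y ys ih =>
    simp only [insortInt]
    split_ifs with h
    · exact ((ih.cons y).trans (List.Perm.swap x y ys))
    · exact List.Perm.refl _

theorem insortInt_pairwise (x : Int) (ys : List Int)
    (h : ys.Pairwise (· ≤ ·)) : (insortInt x ys).Pairwise (· ≤ ·) := by
  induction ys with
  | nil => simp [insortInt]
  | cons y ys ih =>
    rcases List.pairwise_cons.mp h with ⟨hy, hys⟩
    simp only [insortInt]
    split_ifs with hle
    · refine List.pairwise_cons.mpr ⟨?_, ih hys⟩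
      intro z hz
      rcases (mem_insortInt x z ys).mp hz with rfl | hz
      · exact hle
      · exact hy z hz
    · refine List.pairwise_cons.mpr ⟨?_, h⟩
      intro z hz
      rcases List.mem_cons.mp hz with rfl | hz
      · exact le_of_lt (lt_of_not_ge hle)
      · exact le_of_lt (lt_of_lt_of_le (lt_of_not_ge hle) (hy z hz))

-- sorted(xs ++ [x]) = insert x into sorted(xs)
theorem sorted_append_singleton (xs : List Int) (x : Int) :
    PySem.List.sorted (xs ++ [x]) (fun y => y) false
      = insortInt x (PySem.List.sorted xs (fun y => y) false) := by
  refine PySem.List.sorted_id_eq_of_perm_of_pairwise _ _ ?_ ?_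
  · refine (insortInt_perm x _).trans ?_
    refine ((PySem.List.sorted_perm xs (fun y => y) false).cons x).trans ?_
    simpa using (List.perm_append_comm (l₁ := [x]) (l₂ := xs))
  · apply insortInt_pairwise
    have h := PySem.List.sorted_pairwise xs (fun y => y)
    simpa using h

-- one tuple of A = one tuple of B
theorem tuple_eq (xs : List Int) (b c : Int) :
    PySem.List.sorted
      (let res := if 3 ≤ b then xs ++ [b] else xs
       if 3 ≤ c then res ++ [c] else res) (fun y => y) false
      = (let r := if 3 ≤ b then insortInt b (PySem.List.sorted xs (fun y => y) false)
                  else PySem.List.sorted xs (fun y => y) false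
         if 3 ≤ c then insortInt c r else r) := by
  by_cases hb : 3 ≤ b <;> by_cases hc : 3 ≤ c <;>
    simp only [hb, hc, if_pos, if_neg, not_false_iff]
  · rw [sorted_append_singleton, sorted_append_singleton]
  · rw [sorted_append_singleton]
  · rw [sorted_append_singleton]

-- ===== VERDICT (by name: the statement is the Claim_ definition above) =====
theorem neigbours_spec : Claim_equal_neigbours := by
  intro u _
  unfold Spec_neigbours neigbours neigbours_alt
  refine PySem.List.foldl_congr_mem _ _ _ _ ?_
  intro nbs i _
  simp only [PySem.List.foldl_append_singleton_eq_map]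
  congr 1
  refine List.map_congr_left ?_
  intro b _
  exact tuple_eq (u.take i ++ u.drop (i + 1)) b (u.getD i 0 - 3 - b)
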